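-- pv_equiv track=rewrite | github.com/kagemeka/dsalgo-python | src/dsalgo/euler_tour.py | compute_parent
-- ===== SOURCE A (Python) =====
-- import typing
--
-- def compute_parent(
--     tour_edges: typing.List[int],
-- ) -> typing.List[typing.Optional[int]]:
--     """Compute parent from Euler-tour-on-edges.
--
--     Args:
--         tour_edges (typing.List[int]): euler tour on edges.
--
--     Returns:
--         typing.List[typing.Optional[int]]:
--             parent list.
--             the tour root's parent is None.
--
--     Examples:
--         >>> tour_edges = [0, 1, 4, -5, 2, -3, -2, 3, -4, -1]
--         >>> compute_parent(tour_edges)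
--         [None, 0, 1, 0, 1]
--     """
--     n = len(tour_edges) >> 1
--     parent: typing.List[typing.Optional[int]] = [None] * n
--     st = [tour_edges[0]]
--     for u in tour_edges[1:]:
--         if u < 0:
--             st.pop()
--             continue
--         parent[u] = st[-1]
--         st.append(u)
--
--     return parent
-- ===== SOURCE B (Python) =====
-- import typing
--
-- def compute_parent(
--     tour_edges: typing.List[int],
-- ) -> typing.List[typing.Optional[int]]:
--     """Compute parent from Euler-tour-on-edges by recursive descent:
--     the tour is parsed as a nested bracket sequence (a nonnegative entry
--     opens a subtree, a negative entry closes it), recursing into each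
--     subtree instead of scanning with an explicit stack."""
--     n = len(tour_edges) >> 1
--     parent: typing.List[typing.Optional[int]] = [None] * n
--
--     def parse(i: int, par: int) -> int:
--         # consume the sibling subtrees rooted under `par`, then skip the close
--         while i < len(tour_edges) and tour_edges[i] >= 0:
--             u = tour_edges[i]
--             parent[u] = par
--             i = parse(i + 1, u)
--         return i + 1
--
--     parse(1, tour_edges[0])
--     return parent
-- ===== Notes on version B (the rewrite author's own statement) =====
-- stated objective: alternative
-- what changed: Replaces A's single linear scan with an explicit stack by a recursive-descent parse of the tour as a nested bracket sequence: each nonnegative entry opens a subtree handled by a recursive call that assigns its children's parents and returns the index past the subtree's closing marker, so no stack container exists and backtracking is the call returns.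
import Mathlib
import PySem

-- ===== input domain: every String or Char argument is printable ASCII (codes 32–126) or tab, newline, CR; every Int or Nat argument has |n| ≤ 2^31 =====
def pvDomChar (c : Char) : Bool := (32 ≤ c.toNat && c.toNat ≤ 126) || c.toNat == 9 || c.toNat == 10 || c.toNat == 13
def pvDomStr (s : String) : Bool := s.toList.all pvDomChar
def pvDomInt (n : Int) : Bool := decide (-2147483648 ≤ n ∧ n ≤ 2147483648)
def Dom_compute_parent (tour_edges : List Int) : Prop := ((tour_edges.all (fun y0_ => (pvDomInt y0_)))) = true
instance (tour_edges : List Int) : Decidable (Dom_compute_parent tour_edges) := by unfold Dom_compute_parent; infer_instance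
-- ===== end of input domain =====

-- B parses the tour by recursive descent (tree recursion into each subtree) instead of
-- A's linear scan with an explicit backtracking stack (objective: alternative, same O(n)).

-- ===== PORT A =====
-- Loop of A: state is (parent, st); Python's stack top (its last element) is the HEAD of `st` here.
-- st.pop() and reading the stack top of an empty stack raise in Python: `st.tail` / `st.headD 0` are inexact
-- there, and `parent.set` is a no-op where Python's `parent[u] =` raises (u ≥ n);
-- all those inputs are excluded by Pre_compute_parent.
def goA : List (Option Int) → List Int → List Int → List (Option Int)
  | parent, _, [] => parent
  | parent, st, u :: rs =>
    if u < 0 then goA parent st.tail rs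
    else goA (parent.set u.toNat (some (st.headD 0))) (u :: st) rs

def compute_parent (tour_edges : List Int) : List (Option Int) :=
  match tour_edges with
  | [] => []        -- Python raises IndexError on tour_edges[0]; excluded by Pre_compute_parent
  | t0 :: rest => goA (List.replicate ((rest.length + 1) / 2) none) [t0] rest

-- ===== PORT B =====
-- B's inner function `parse(i, par)` walked an index over tour_edges; here the suffix
-- tour_edges[i:] is passed instead of i, and the returned index becomes the returned
-- remaining suffix (the subtype bound on its length is only a termination certificate).
-- `parent.set` is a no-op where Python's `parent[u] =` raises (u ≥ n); excluded by Pre_.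
def parseB (parent : List (Option Int)) (l : List Int) (par : Int) :
    List (Option Int) × { r : List Int // r.length ≤ l.length } :=
  match l with
  | [] => (parent, ⟨[], Nat.le_refl _⟩)
  | u :: rest =>
    if u < 0 then (parent, ⟨rest, Nat.le_succ _⟩)
    else
      let x := parseB (parent.set u.toNat (some par)) rest u
      let y := parseB x.1 x.2.1 par
      (y.1, ⟨y.2.1, Nat.le_trans y.2.2 (Nat.le_trans x.2.2 (Nat.le_succ _))⟩)
termination_by l.length
decreasing_by
  · simp
  · have h := x.2.2; simp; omega

def compute_parent_alt (tour_edges : List Int) : List (Option Int) :=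
  match tour_edges with
  | [] => []        -- Python raises IndexError on tour_edges[0]; excluded by Pre_compute_parent
  | t0 :: rest => (parseB (List.replicate ((rest.length + 1) / 2) none) rest t0).1

-- ===== PRECONDITION & SPEC =====
-- number of entering (push) steps in l
def cntP (l : List Int) : Nat := l.countP (fun u => decide (0 ≤ u))
-- number of leaving (pop) steps in l
def cntN (l : List Int) : Nat := l.countP (fun u => decide (u < 0))

-- Pre_ is exactly the set of inputs on which Python A returns: it excludes the empty tour
-- (IndexError on tour_edges[0]), tours containing a vertex u ≥ n (IndexError on parent[u]),
-- and tours whose pop steps outnumber the preceding push steps at some point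
-- (IndexError on popping or reading the top of the stack once it is exhausted).
def Pre_compute_parent (tour_edges : List Int) : Prop :=
  tour_edges ≠ [] ∧
  (∀ u ∈ tour_edges.tail, 0 ≤ u → u < ((tour_edges.length / 2 : Nat) : Int)) ∧
  (∀ i < tour_edges.tail.length, cntN (tour_edges.tail.take i) ≤ cntP (tour_edges.tail.take i))

instance (tour_edges : List Int) : Decidable (Pre_compute_parent tour_edges) := by
  unfold Pre_compute_parent; infer_instance

def pvWitness_compute_parent : List Int := ([0, 1, 4, -5, 2, -3, -2, 3, -4, -1] : List Int)

def Spec_compute_parent (tour_edges : List Int) (out : List (Option Int)) : Prop := out = compute_parent_alt tour_edges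
instance (tour_edges : List Int) (out : List (Option Int)) : Decidable (Spec_compute_parent tour_edges out) := by unfold Spec_compute_parent; infer_instance

-- ===== CLAIM (what is proved, stated in full; the proofs are below) =====
def Claim_equal_compute_parent : Prop := ∀ (tour_edges : List Int), Dom_compute_parent tour_edges → Pre_compute_parent tour_edges → Spec_compute_parent tour_edges (compute_parent tour_edges)

-- ===== LEMMAS AND PROOFS =====

-- A's scan with stack (par :: st) runs parseB's parse of l and then continues as A's scan
-- with stack st on parseB's remaining suffix.  No side condition is needed: both sides
-- write the very same `parent.set u.toNat (some par)` at each push step.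
theorem goA_parseB : ∀ (n : Nat) (l : List Int), l.length ≤ n →
    ∀ (parent : List (Option Int)) (st : List Int) (par : Int),
      goA parent (par :: st) l = goA (parseB parent l par).1 st (parseB parent l par).2.1
  | _, [], _, parent, st, par => by simp [goA, parseB]
  | 0, _ :: _, h, _, _, _ => by simp at h
  | n + 1, u :: rest, h, parent, st, par => by
    by_cases hu : u < 0
    · simp [goA, parseB, hu]
    · have hr : rest.length ≤ n := by simp at h; omega
      have ih1 := goA_parseB n rest hr (parent.set u.toNat (some par)) (par :: st) u
      have hx : (parseB (parent.set u.toNat (some par)) rest u).2.1.length ≤ n :=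
        Nat.le_trans (parseB (parent.set u.toNat (some par)) rest u).2.2 hr
      have ih2 := goA_parseB n _ hx
        (parseB (parent.set u.toNat (some par)) rest u).1 st par
      simp only [goA, parseB, if_neg hu, List.headD_cons]
      rw [ih1, ih2]

-- parseB either consumes all of l, or stops just past a step where the pop steps of the
-- consumed prefix outnumber its push steps by exactly one.
theorem parseB_rem : ∀ (n : Nat) (l : List Int), l.length ≤ n →
    ∀ (parent : List (Option Int)) (par : Int),
      (parseB parent l par).2.1 = [] ∨
      ∃ j, j + 1 ≤ l.length ∧ cntN (l.take (j + 1)) = cntP (l.take (j + 1)) + 1 ∧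
        (parseB parent l par).2.1 = l.drop (j + 1)
  | _, [], _, parent, par => by simp [parseB]
  | 0, _ :: _, h, _, _ => by simp at h
  | n + 1, u :: rest, h, parent, par => by
    have hr : rest.length ≤ n := by simp at h; omega
    by_cases hu : u < 0
    · rcases rest with _ | ⟨v, rest'⟩
      · left; simp [parseB, hu]
      · right
        refine ⟨0, by simp, ?_, by simp [parseB, hu]⟩
        simp [cntN, cntP, hu, not_le.mpr hu]
    · -- push step
      set x := parseB (parent.set u.toNat (some par)) rest u with hxdef
      have hx : x.2.1.length ≤ n := Nat.le_trans x.2.2 hr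
      have hres : (parseB parent (u :: rest) par).2.1 = (parseB x.1 x.2.1 par).2.1 := by
        simp only [parseB, if_neg hu]
        rw [← hxdef]
      rcases parseB_rem n x.2.1 hx x.1 par with hy | ⟨j2, hj2, hc2, he2⟩
      · left; rw [hres, hy]
      · -- inner parse of x.2.1 stopped early; relate x.2.1 to rest
        rcases parseB_rem n rest hr (parent.set u.toNat (some par)) u with hx1 | ⟨j1, hj1, hc1, he1⟩
        · -- x.2.1 = [] : then the second parse consumes nothing, remainder []
          left
          rw [hres]
          rw [← hxdef] at hx1
          rw [hx1] at he2 ⊢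
          simpa using he2
        · rw [← hxdef] at he1
          right
          refine ⟨j1 + j2 + 2, ?_, ?_, ?_⟩
          · have h2 : j2 + 1 ≤ (rest.drop (j1 + 1)).length := he1 ▸ hj2
            simp only [List.length_cons]
            simp only [List.length_drop] at h2
            omega
          · have hsplit : rest.take (j1 + 1 + (j2 + 1)) =
                rest.take (j1 + 1) ++ (rest.drop (j1 + 1)).take (j2 + 1) := by
              rw [List.take_add]
            have : (u :: rest).take (j1 + j2 + 2 + 1) = u :: rest.take (j1 + 1 + (j2 + 1)) := by
              have he : j1 + j2 + 2 + 1 = (j1 + 1 + (j2 + 1)) + 1 := by omega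
              rw [he, List.take_succ_cons]
            rw [this, hsplit]
            rw [he1] at hc2
            simp only [cntN, cntP, List.countP_cons, List.countP_append,
              decide_eq_true_eq] at hc1 hc2 ⊢
            rw [if_neg hu, if_pos (not_lt.mp hu)]
            omega
          · rw [hres, he2, he1, List.drop_drop]
            have : (u :: rest).drop (j1 + j2 + 2 + 1) = rest.drop (j1 + j2 + 2) := by simp
            rw [this]
            congr 1
            omega

-- ===== VERDICT (by name: the statement is the Claim_ definition above) =====
theorem compute_parent_spec : Claim_equal_compute_parent := by
  intro t _ hpre
  unfold Spec_compute_parent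
  obtain ⟨t0, rest, rfl⟩ : ∃ t0 rest, t = t0 :: rest := by
    cases t with
    | nil => exact absurd rfl hpre.1
    | cons t0 rest => exact ⟨t0, rest, rfl⟩
  obtain ⟨-, -, hbal⟩ := hpre
  simp only [List.tail_cons] at hbal
  show compute_parent (t0 :: rest) = compute_parent_alt (t0 :: rest)
  simp only [compute_parent, compute_parent_alt]
  rw [goA_parseB rest.length rest (Nat.le_refl _) _ [] t0]
  rcases parseB_rem rest.length rest (Nat.le_refl _)
      (List.replicate ((rest.length + 1) / 2) none) t0 with hrem | ⟨j, hj, hc, he⟩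
  · rw [hrem]; rfl
  · by_cases hlt : j + 1 < rest.length
    · exact absurd (hbal (j + 1) hlt) (by omega)
    · have : rest.drop (j + 1) = [] := List.drop_eq_nil_of_le (by omega)
      rw [he, this]
      rfl
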